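-- pv_equiv track=rewrite | github.com/amandhawb/algorithms | mock_interviews/dec_06/questions.py | nextSpecialNumber
-- ===== SOURCE A (Python) =====
-- def nextSpecialNumber(kth, end):
--     i = 0
--     while kth > 0:
--         i = i + 1
--         last_tree_digits = ((i % 1000) * (i % 1000)) % 1000
--         last_tree_digits = (last_tree_digits * (i % 1000)) % 1000
--         if last_tree_digits == end:
--             kth = kth -1
--     return i
-- ===== SOURCE B (Python) =====
-- def nextSpecialNumber(kth, end):
--     # Block arithmetic: cubes mod 1000 are periodic in i with period 1000,
--     # so precompute the matching residues once and index directly.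
--     if kth <= 0:
--         return 0
--     R = [r for r in range(1000) if (r * r * r) % 1000 == end]
--     if 0 in R:
--         kth += 1  # the loop in the spec starts at i = 1, skipping the i = 0 candidate
--     q, rem = divmod(kth - 1, len(R))
--     return 1000 * q + R[rem]
-- ===== Notes on version B (the rewrite author's own statement) =====
-- stated objective: alternative
-- what changed: Replaces A's count-every-integer loop by precomputing the 1000 cube residues once and computing the kth match directly with divmod block arithmetic (intended as faster; a timing run could not confirm it because on ends with no cube residue A diverges and B raises).
import Mathlib
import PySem

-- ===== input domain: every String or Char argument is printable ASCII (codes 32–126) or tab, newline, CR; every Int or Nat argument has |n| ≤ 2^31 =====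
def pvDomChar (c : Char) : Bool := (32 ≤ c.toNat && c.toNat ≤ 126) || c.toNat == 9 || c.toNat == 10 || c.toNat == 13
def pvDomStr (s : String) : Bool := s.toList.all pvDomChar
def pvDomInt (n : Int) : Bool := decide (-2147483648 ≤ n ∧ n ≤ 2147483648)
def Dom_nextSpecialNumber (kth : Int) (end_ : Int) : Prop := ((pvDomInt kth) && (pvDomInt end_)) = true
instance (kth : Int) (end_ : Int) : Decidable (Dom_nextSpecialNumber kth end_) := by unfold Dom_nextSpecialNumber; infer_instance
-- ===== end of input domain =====

set_option maxRecDepth 8000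


-- B replaces A's counting loop by a one-off table of the cube residues mod 1000
-- and direct block arithmetic (divmod); objective: alternative algorithm.

-- ===== PORT A =====
-- A's while-loop; the fuel argument only makes the recursion total (under Pre_
-- the fuel chosen in nextSpecialNumber always suffices, proved below).
def pvLoopA (end_ : Int) : Nat → Int → Int → Int
  | 0, _, i => i
  | fuel + 1, kth, i =>
    if kth > 0 then
      let i' := i + 1
      let d0 := PySem.Int.mod (PySem.Int.mod i' 1000 * PySem.Int.mod i' 1000) 1000
      let d  := PySem.Int.mod (d0 * PySem.Int.mod i' 1000) 1000
      pvLoopA end_ fuel (if d = end_ then kth - 1 else kth) i'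
    else i

def nextSpecialNumber (kth : Int) (end_ : Int) : Int :=
  pvLoopA end_ ((kth.toNat + 1) * 1000) kth 0

-- ===== PORT B =====
-- the list comprehension [r for r in range(1000) if (r*r*r) % 1000 == end]
def pvR (end_ : Int) : List Int :=
  (PySem.List.pyRange 0 1000 1).filter (fun r => PySem.Int.mod (r * r * r) 1000 == end_)

def nextSpecialNumber_alt (kth : Int) (end_ : Int) : Int :=
  if kth ≤ 0 then 0
  else
    let R := pvR end_
    let kth' := if (0 : Int) ∈ R then kth + 1 else kth
    match PySem.Int.divmod? (kth' - 1) (R.length : Int) with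
    | some (q, rem) => 1000 * q + (PySem.List.pyGet? R rem).getD 0
      -- R[rem]: under Pre_ the index rem is always in range, so .getD 0 is exact
    | none => 0  -- Python's ZeroDivisionError (R empty); excluded by Pre_

-- ===== PRECONDITION & SPEC =====
-- Pre_ excludes exactly the inputs on which A never returns: kth > 0 with an
-- end_ that is not a cube residue mod 1000 (A's loop then never finds a match
-- and diverges; B raises ZeroDivisionError there).
def Pre_nextSpecialNumber (kth : Int) (end_ : Int) : Prop :=
  kth ≤ 0 ∨ ∃ r ∈ Finset.range 1000, ((r : Int) * r * r) % 1000 = end_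
instance (kth : Int) (end_ : Int) : Decidable (Pre_nextSpecialNumber kth end_) := by
  unfold Pre_nextSpecialNumber; infer_instance

def pvWitness_nextSpecialNumber : Int × Int := (0, 8)

def Spec_nextSpecialNumber (kth : Int) (end_ : Int) (out : Int) : Prop := out = nextSpecialNumber_alt kth end_
instance (kth : Int) (end_ : Int) (out : Int) : Decidable (Spec_nextSpecialNumber kth end_ out) := by unfold Spec_nextSpecialNumber; infer_instance

-- ===== CLAIM (what is proved, stated in full; the proofs are below) =====
def Claim_equal_nextSpecialNumber : Prop := ∀ (kth : Int) (end_ : Int), Dom_nextSpecialNumber kth end_ → Pre_nextSpecialNumber kth end_ → Spec_nextSpecialNumber kth end_ (nextSpecialNumber kth end_)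

-- ===== LEMMAS AND PROOFS =====

theorem pv_mod1000 (x : Int) : PySem.Int.mod x 1000 = x % 1000 :=
  PySem.Int.mod_eq_emod_of_pos (by norm_num)
theorem pv_mem_R {e x : Int} : x ∈ pvR e ↔ 0 ≤ x ∧ x < 1000 ∧ x * x * x % 1000 = e := by
  simp [pvR, List.mem_filter, PySem.List.mem_pyRange_one, and_assoc]
theorem pv_key (a b : Int) : a % 1000 * b % 1000 = a * b % 1000 := by
  conv_rhs => rw [Int.mul_emod]
  rw [Int.mul_emod, Int.emod_emod_of_dvd _ dvd_rfl]
theorem pv_cond_iff (e i : Int) :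
    (PySem.Int.mod (PySem.Int.mod (PySem.Int.mod i 1000 * PySem.Int.mod i 1000) 1000 * PySem.Int.mod i 1000) 1000 = e)
      ↔ (i % 1000) ∈ pvR e := by
  rw [pv_mem_R]
  simp only [pv_mod1000, pv_key]
  rw [show i % 1000 * (i % 1000) * (i % 1000) % 1000 = i * (i % 1000) * (i % 1000) % 1000 by
        rw [mul_assoc, pv_key, ← mul_assoc]]
  constructor
  · intro h
    exact ⟨Int.emod_nonneg i (by norm_num), Int.emod_lt_of_pos i (by norm_num), h⟩
  · rintro ⟨-, -, h⟩; exact h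
theorem pv_R_sorted (e : Int) : (pvR e).Pairwise (· < ·) :=
  (PySem.List.pairwise_lt_pyRange_one 0 1000).sublist List.filter_sublist

-- pvSeq e n: the n-th (0-indexed) nonnegative integer j with j % 1000 ∈ pvR e
def pvSeq (e : Int) (n : Nat) : Int :=
  1000 * ((n / (pvR e).length : Nat) : Int) + (pvR e).getD (n % (pvR e).length) 0

theorem pv_getD_mem {e : Int} {j : Nat} (h : j < (pvR e).length) :
    (pvR e).getD j 0 ∈ pvR e := by
  rw [List.getD_eq_getElem _ _ h]; exact List.getElem_mem h

theorem pv_getD_bounds {e : Int} {j : Nat} (h : j < (pvR e).length) :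
    0 ≤ (pvR e).getD j 0 ∧ (pvR e).getD j 0 < 1000 := by
  have := pv_mem_R.mp (pv_getD_mem h)
  exact ⟨this.1, this.2.1⟩

theorem pv_getD_lt {e : Int} {j j' : Nat} (hjj : j < j') (h : j' < (pvR e).length) :
    (pvR e).getD j 0 < (pvR e).getD j' 0 := by
  rw [List.getD_eq_getElem _ _ (lt_trans hjj h), List.getD_eq_getElem _ _ h]
  exact (List.pairwise_iff_getElem.mp (pv_R_sorted e)) j j' _ h hjj

theorem pv_seq_strictMono {e : Int} (hm : 0 < (pvR e).length) : StrictMono (pvSeq e) := by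
  apply strictMono_nat_of_lt_succ
  intro n
  unfold pvSeq
  set m := (pvR e).length with hmdef
  have hr : n % m < m := Nat.mod_lt _ hm
  have hdecomp : n + 1 = m * (n / m) + (n % m + 1) := by
    have := Nat.div_add_mod n m; omega
  rcases Nat.lt_or_ge (n % m + 1) m with hlt | hge
  · have h1 : (n + 1) / m = n / m := by
      rw [hdecomp, Nat.mul_add_div hm, Nat.div_eq_of_lt hlt, Nat.add_zero]
    have h2 : (n + 1) % m = n % m + 1 := by
      rw [hdecomp]; rw [Nat.mul_add_mod]; exact Nat.mod_eq_of_lt hlt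
    rw [h1, h2]
    have hlt2 := pv_getD_lt (show n % m < n % m + 1 by omega) (hlt.trans_eq hmdef)
    omega
  · have heq : n % m + 1 = m := by omega
    have hd2 : n + 1 = m * (n / m + 1) := by rw [hdecomp, heq, Nat.mul_succ]
    have h1 : (n + 1) / m = n / m + 1 := by
      rw [hd2, Nat.mul_div_cancel_left _ hm]
    have h2 : (n + 1) % m = 0 := by
      rw [hd2, Nat.mul_mod_right]
    rw [h1, h2]
    have b1 := pv_getD_bounds (hr.trans_eq hmdef)
    have b2 := pv_getD_bounds (hm.trans_eq hmdef)
    push_cast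
    omega

theorem pv_seq_mod {e : Int} (hm : 0 < (pvR e).length) (n : Nat) :
    (pvSeq e n) % 1000 = (pvR e).getD (n % (pvR e).length) 0 := by
  have hb := pv_getD_bounds (Nat.mod_lt n hm)
  unfold pvSeq
  omega

theorem pv_seq_match {e : Int} (hm : 0 < (pvR e).length) (n : Nat) :
    0 ≤ pvSeq e n ∧ (pvSeq e n) % 1000 ∈ pvR e := by
  have hb := pv_getD_bounds (Nat.mod_lt n hm)
  constructor
  · unfold pvSeq
    have hc : (0:Int) ≤ ((n / (pvR e).length : Nat) : Int) := Int.natCast_nonneg _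
    omega
  · rw [pv_seq_mod hm]; exact pv_getD_mem (Nat.mod_lt n hm)

theorem pv_seq_surj {e j : Int} (hm : 0 < (pvR e).length) (hj : 0 ≤ j)
    (h : j % 1000 ∈ pvR e) : ∃ n, pvSeq e n = j := by
  set m := (pvR e).length with hmdef
  refine ⟨m * (j / 1000).toNat + (pvR e).idxOf (j % 1000), ?_⟩
  have hidx : (pvR e).idxOf (j % 1000) < m := List.idxOf_lt_length_of_mem h
  have hdiv : (m * (j / 1000).toNat + (pvR e).idxOf (j % 1000)) / m = (j / 1000).toNat := by
    rw [Nat.mul_add_div hm, Nat.div_eq_of_lt hidx, Nat.add_zero]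
  have hmod : (m * (j / 1000).toNat + (pvR e).idxOf (j % 1000)) % m = (pvR e).idxOf (j % 1000) := by
    rw [Nat.mul_add_mod]; exact Nat.mod_eq_of_lt hidx
  unfold pvSeq
  rw [← hmdef, hdiv, hmod]
  rw [List.getD_eq_getElem _ _ (hidx.trans_eq hmdef), List.getElem_idxOf]
  have h1000 : ((j / 1000).toNat : Int) = j / 1000 := Int.toNat_of_nonneg (Int.ediv_nonneg hj (by norm_num))
  rw [h1000]
  omega

theorem pvLoopA_nonpos (e : Int) (fuel : Nat) (kth i : Int) (h : ¬ kth > 0) :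
    pvLoopA e fuel kth i = i := by
  cases fuel <;> simp [pvLoopA, h]

theorem pv_main {e : Int} (hm : 0 < (pvR e).length) :
    ∀ (fuel : Nat) (kth : Int) (n : Nat) (i : Int), 0 < kth → 0 ≤ i →
      i < pvSeq e n → (n = 0 ∨ pvSeq e (n - 1) ≤ i) →
      pvSeq e (n + kth.toNat - 1) ≤ i + (fuel : Int) →
      pvLoopA e fuel kth i = pvSeq e (n + kth.toNat - 1) := by
  intro fuel
  induction fuel with
  | zero =>
    intro kth n i hk hi hlt hlow hfuel
    exfalso
    have h1 : pvSeq e n ≤ pvSeq e (n + kth.toNat - 1) :=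
      (pv_seq_strictMono hm).monotone (by omega)
    simp only [Nat.cast_zero] at hfuel
    omega
  | succ fuel ih =>
    intro kth n i hk hi hlt hlow hfuel
    simp only [pvLoopA, if_pos hk]
    by_cases hc : PySem.Int.mod (PySem.Int.mod (PySem.Int.mod (i+1) 1000 * PySem.Int.mod (i+1) 1000) 1000 * PySem.Int.mod (i+1) 1000) 1000 = e
    · rw [if_pos hc]
      have hmem : (i+1) % 1000 ∈ pvR e := (pv_cond_iff e (i+1)).mp hc
      obtain ⟨n', hn'⟩ := pv_seq_surj hm (by omega) hmem
      have hnn : n' = n := by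
        have hle : n' ≤ n := by
          by_contra hgt
          have := pv_seq_strictMono hm (show n < n' by omega)
          omega
        rcases hlow with h0 | hlow
        · omega
        · by_contra hne
          have : pvSeq e n' ≤ pvSeq e (n - 1) :=
            (pv_seq_strictMono hm).monotone (by omega)
          omega
      subst hnn
      by_cases hk1 : kth = 1
      · subst hk1
        rw [pvLoopA_nonpos e fuel _ _ (by omega)]
        have : n' + (1:Int).toNat - 1 = n' := by omega
        rw [this]; omega
      · have hidx : n' + kth.toNat - 1 = (n' + 1) + (kth - 1).toNat - 1 := by omega
        rw [hidx]
        apply ih (kth - 1) (n' + 1) (i + 1) (by omega) (by omega)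
        · rw [← hn']; exact pv_seq_strictMono hm (Nat.lt_succ_self _)
        · right; simp only [Nat.add_sub_cancel]; omega
        · rw [← hidx]; push_cast at hfuel ⊢; omega
    · rw [if_neg hc]
      have hne : i + 1 ≠ pvSeq e n := by
        intro h
        apply hc
        apply (pv_cond_iff e (i+1)).mpr
        rw [h]
        exact (pv_seq_match hm n).2
      apply ih kth n (i + 1) hk (by omega) (by omega)
      · rcases hlow with h0 | hlow
        · exact Or.inl h0
        · right; omega
      · push_cast at hfuel ⊢; omega

theorem pv_head_le {e x : Int} (hx : x ∈ pvR e) : (pvR e).getD 0 0 ≤ x := by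
  obtain ⟨j, hj, rfl⟩ := List.getElem_of_mem hx
  have hm : 0 < (pvR e).length := by omega
  rw [List.getD_eq_getElem _ _ hm]
  rcases Nat.eq_zero_or_pos j with h0 | hpos
  · subst h0; exact le_refl _
  · exact le_of_lt ((List.pairwise_iff_getElem.mp (pv_R_sorted e)) 0 j hm hj hpos)

theorem pv_final : ∀ (kth e : Int), (kth ≤ 0 ∨ ∃ r ∈ Finset.range 1000, ((r : Int) * r * r) % 1000 = e) →
    nextSpecialNumber kth e = nextSpecialNumber_alt kth e := by
  intro kth e hpre
  by_cases hk : kth ≤ 0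
  · rw [nextSpecialNumber, pvLoopA_nonpos e _ _ _ (by omega), nextSpecialNumber_alt, if_pos hk]
  · rcases hpre with h | ⟨r, hr, hre⟩
    · omega
    have hk' : 0 < kth := by omega
    simp only [Finset.mem_range] at hr
    have hmem : ((r : Int)) ∈ pvR e := by
      rw [pv_mem_R]
      refine ⟨Int.natCast_nonneg _, by exact_mod_cast hr, hre⟩
    have hm : 0 < (pvR e).length := List.length_pos_of_mem hmem
    set z : Nat := if (0 : Int) ∈ pvR e then 1 else 0 with hz
    -- initial conditions for the loop invariant
    have hseq0 : (0 : Int) ∈ pvR e → pvSeq e 0 = 0 := by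
      intro h0
      have hle := pv_head_le h0
      have hb := pv_getD_bounds hm
      unfold pvSeq
      rw [Nat.zero_div, Nat.zero_mod]
      omega
    have h0lt : 0 < pvSeq e z := by
      rw [hz]
      split_ifs with h0
      · have := pv_seq_strictMono hm (show 0 < 1 by omega)
        rw [hseq0 h0] at this; exact this
      · have hb := pv_getD_bounds hm
        have hne : (pvR e).getD (0 % (pvR e).length) 0 ≠ 0 := by
          rw [Nat.zero_mod]
          intro hcon
          exact h0 (hcon ▸ pv_getD_mem hm)
        unfold pvSeq
        rw [Nat.zero_div, Nat.zero_mod] at *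
        simp only [Nat.cast_zero, mul_zero, zero_add]
        omega
    have hlow0 : z = 0 ∨ pvSeq e (z - 1) ≤ 0 := by
      rw [hz]; split_ifs with h0
      · right; simp only [Nat.sub_self]; rw [hseq0 h0]
      · left; rfl
    have hbound : ∀ n : Nat, pvSeq e n ≤ 1000 * (n : Int) + 999 := by
      intro n
      have hb := pv_getD_bounds (Nat.mod_lt n hm)
      have hd : n / (pvR e).length ≤ n := Nat.div_le_self _ _
      unfold pvSeq
      have : ((n / (pvR e).length : Nat) : Int) ≤ (n : Int) := by exact_mod_cast hd
      omega
    have hfuel : pvSeq e (z + kth.toNat - 1) ≤ 0 + (((kth.toNat + 1) * 1000 : Nat) : Int) := by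
      have hb := hbound (z + kth.toNat - 1)
      have hzle : z ≤ 1 := by rw [hz]; split_ifs <;> omega
      have : ((z + kth.toNat - 1 : Nat) : Int) ≤ (kth.toNat : Int) := by omega
      push_cast at *
      omega
    have hA : nextSpecialNumber kth e = pvSeq e (z + kth.toNat - 1) :=
      pv_main hm _ kth z 0 hk' (le_refl 0) h0lt hlow0 hfuel
    -- B's side
    have hBval : nextSpecialNumber_alt kth e = pvSeq e (kth.toNat - 1 + z) := by
      rw [nextSpecialNumber_alt, if_neg hk]
      show (match PySem.Int.divmod? ((if (0 : Int) ∈ pvR e then kth + 1 else kth) - 1) ((pvR e).length : Int) with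
            | some (q, rem) => 1000 * q + (PySem.List.pyGet? (pvR e) rem).getD 0
            | none => 0) = pvSeq e (kth.toNat - 1 + z)
      have hkth' : (if (0 : Int) ∈ pvR e then kth + 1 else kth) - 1 = ((kth.toNat - 1 + z : Nat) : Int) := by
        rw [hz]; split_ifs <;> push_cast <;> omega
      have hnil : pvR e ≠ [] := List.ne_nil_of_length_pos hm
      have hmpos : (0 : Int) < ((pvR e).length : Int) := by exact_mod_cast hm
      have hdm : ∀ x : Int, PySem.Int.divmod? x ((pvR e).length : Int)
          = some (x / ((pvR e).length : Int), x % ((pvR e).length : Int)) := by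
        intro x
        have h1 : PySem.Int.floordiv x ((pvR e).length : Int) = x / ((pvR e).length : Int) :=
          PySem.Int.floordiv_eq_ediv_of_pos hmpos
        have h2 : PySem.Int.mod x ((pvR e).length : Int) = x % ((pvR e).length : Int) :=
          PySem.Int.mod_eq_emod_of_pos hmpos
        rw [← h1, ← h2]
        simp [PySem.Int.divmod?, hnil, PySem.Int.floordiv, PySem.Int.mod]
      rw [hkth', hdm]
      show 1000 * (((kth.toNat - 1 + z : Nat) : Int) / ((pvR e).length : Int))
            + (PySem.List.pyGet? (pvR e) (((kth.toNat - 1 + z : Nat) : Int) % ((pvR e).length : Int))).getD 0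
          = pvSeq e (kth.toNat - 1 + z)
      have hc1 : (((kth.toNat - 1 + z : Nat) : Int) / ((pvR e).length : Int))
          = (((kth.toNat - 1 + z) / (pvR e).length : Nat) : Int) := by push_cast; ring
      have hc2 : (((kth.toNat - 1 + z : Nat) : Int) % ((pvR e).length : Int))
          = (((kth.toNat - 1 + z) % (pvR e).length : Nat) : Int) := by push_cast; ring
      rw [hc1, hc2, PySem.List.pyGet?_natCast, pvSeq, ← List.getD_eq_getElem?_getD]
    rw [hA, hBval]
    congr 1
    omega

-- ===== VERDICT (by name: the statement is the Claim_ definition above) =====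
theorem nextSpecialNumber_spec : Claim_equal_nextSpecialNumber := by
  intro kth end_ _ hpre
  exact pv_final kth end_ hpre
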